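-- pv_equiv track=rewrite | github.com/MrLeeRichards/YOM-Computer-Science-Camp | ELIZA/ELIZA.py | create_statement
-- ===== SOURCE A (Python) =====
-- BE_VERBS = ("AM", "ARE", "DO", "WILL", "WON'T", "DID", "DIDN'T", "DON'T")
--
-- NOM_PRONOUNS = ("I", "YOU", "HE", "SHE", "THEY", "WE")
--
-- QUESTIONS = ("WHY","WHEN","WHERE","HOW","WHAT")
--
-- replacements = {
--     "YOU" : "I",
--     "YOU'RE" : "I'M",
--     "YOUR" : "MY",
--     "I" : "YOU",
--     "WE" : "YOU",
--     "I'M" : "YOU'RE",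
--     "MY" : "YOUR",
--     "OUR" : "YOUR",
--     "AM" : "ARE",
--     "ARE" : "ARE.CHECK", #Dealt with later
-- }
--
-- def create_statement(sentence):
--     response = []
--
--     for word in sentence:
--         if word in replacements.keys():
--             response.append(replacements[word])
--         else:
--             response.append(word)
--
--     if response[0] in QUESTIONS:
--         response = response[1:]
--
--     #Deal with "are"s
--     while "ARE.CHECK" in response:
--         position = response.index("ARE.CHECK")
--         if position > 0 and response[position - 1] == "I":
--             response[position] = "AM"
--         elif position < len(response) - 1 and response[position + 1] == "I":
--             response[position] = "AM"
--         else: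
--             response[position] = "ARE"
--
--     for position in range(len(response) - 1):
--         if response[position] in BE_VERBS and response[position + 1] in NOM_PRONOUNS:
--             response[position], response[position + 1] = response[position + 1], response[position]
--
--     for pronoun in NOM_PRONOUNS:
--         if pronoun in response:
--             response = response[response.index(pronoun):]
--
--     return " ".join(response)
-- ===== SOURCE B (Python) =====
-- BE_VERBS = ("AM", "ARE", "DO", "WILL", "WON'T", "DID", "DIDN'T", "DON'T")
-- NOM_PRONOUNS = ("I", "YOU", "HE", "SHE", "THEY", "WE")
-- QUESTIONS = ("WHY", "WHEN", "WHERE", "HOW", "WHAT")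
--
-- # direct mapping: no "ARE.CHECK" sentinel; the copula is resolved in one pass instead
-- REFLECT = {
--     "YOU": "I",
--     "YOU'RE": "I'M",
--     "YOUR": "MY",
--     "I": "YOU",
--     "WE": "YOU",
--     "I'M": "YOU'RE",
--     "MY": "YOUR",
--     "OUR": "YOUR",
--     "AM": "ARE",
--     "ARE": "ARE",
-- }
--
-- def create_statement(sentence):
--     # map each word, remembering which ones came from an input "ARE"
--     words = [(REFLECT.get(w, w), w == "ARE") for w in sentence]
--
--     if words[0][0] in QUESTIONS:
--         words = words[1:]
--
--     # resolve the copula in ONE left-to-right pass (prev = already-resolved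
--     # previous word, words[i + 1] = unresolved next word)
--     response = []
--     prev = None
--     for i, (w, from_are) in enumerate(words):
--         if from_are:
--             w = "AM" if prev == "I" or (i + 1 < len(words) and words[i + 1][0] == "I") else "ARE"
--         response.append(w)
--         prev = w
--
--     # verb/pronoun swap: hold the current word and bubble a be-verb rightwards
--     if response:
--         out = []
--         cur = response[0]
--         for nxt in response[1:]:
--             if cur in BE_VERBS and nxt in NOM_PRONOUNS:
--                 out.append(nxt)
--             else:
--                 out.append(cur)
--                 cur = nxt
--         out.append(cur)
--         response = out
--
--     for pronoun in NOM_PRONOUNS: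
--         if pronoun in response:
--             response = response[response.index(pronoun):]
--
--     return " ".join(response)
-- ===== Notes on version B (the rewrite author's own statement) =====
-- stated objective: simpler
-- what changed: B maps words directly (no 'ARE.CHECK' sentinel) and resolves the copula in one left-to-right pass instead of A's while-loop of repeated 'in'/'.index' rescans, and does the verb/pronoun swap by holding the current word in a single sweep instead of indexing and mutating the list.
-- outside the precondition, e.g. on create_statement(['ARE.CHECK']): A returns 'ARE', B returns 'ARE.CHECK'
import Mathlib
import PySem

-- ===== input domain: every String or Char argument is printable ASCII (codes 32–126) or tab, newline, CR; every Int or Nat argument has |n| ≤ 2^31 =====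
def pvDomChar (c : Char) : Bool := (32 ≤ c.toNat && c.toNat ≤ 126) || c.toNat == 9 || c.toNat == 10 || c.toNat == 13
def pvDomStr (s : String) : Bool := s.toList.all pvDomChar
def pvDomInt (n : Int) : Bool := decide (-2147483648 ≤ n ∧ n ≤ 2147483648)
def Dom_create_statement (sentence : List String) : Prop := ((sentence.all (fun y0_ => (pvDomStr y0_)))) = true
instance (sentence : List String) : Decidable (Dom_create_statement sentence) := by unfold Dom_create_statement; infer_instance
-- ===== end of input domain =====

-- B eliminates A's "ARE.CHECK" sentinel and the repeated `in`/`.index` rescans of the while loop: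
-- one left-to-right pass resolves the copula, and the verb/pronoun swap holds the current word
-- instead of indexing and mutating the list (objective: simpler).

-- shared module constants (the same tuples in both Python files)
def pvBE : List String := ["AM", "ARE", "DO", "WILL", "WON'T", "DID", "DIDN'T", "DON'T"]
def pvNOM : List String := ["I", "YOU", "HE", "SHE", "THEY", "WE"]
def pvQUESTIONS : List String := ["WHY", "WHEN", "WHERE", "HOW", "WHAT"]

-- ===== PORT A =====
def replacementsA : PySem.Dict String String :=
  PySem.Dict.ofList [("YOU", "I"), ("YOU'RE", "I'M"), ("YOUR", "MY"), ("I", "YOU"),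
    ("WE", "YOU"), ("I'M", "YOU'RE"), ("MY", "YOUR"), ("OUR", "YOUR"),
    ("AM", "ARE"), ("ARE", "ARE.CHECK")]

-- the while loop: fuel = length of the list bounds the number of "ARE.CHECK" occurrences
def resolveA : Nat → List String → List String
  | 0, response => response
  | fuel + 1, response =>
    if "ARE.CHECK" ∈ response then
      match PySem.List.index? response "ARE.CHECK" with
      | none => response
      | some position =>
        if position > 0 ∧ PySem.List.pyGetD response ((position : Int) - 1) "" = "I" then
          resolveA fuel (PySem.List.pySetD response (position : Int) "AM")
        else if (position : Int) < (response.length : Int) - 1 ∧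
            PySem.List.pyGetD response ((position : Int) + 1) "" = "I" then
          resolveA fuel (PySem.List.pySetD response (position : Int) "AM")
        else
          resolveA fuel (PySem.List.pySetD response (position : Int) "ARE")
    else response

def swapA (response : List String) : List String :=
  (PySem.List.pyRange 0 ((response.length : Int) - 1) 1).foldl
    (fun r i =>
      if PySem.List.pyGetD r i "" ∈ pvBE ∧ PySem.List.pyGetD r (i + 1) "" ∈ pvNOM then
        PySem.List.pySetD (PySem.List.pySetD r i (PySem.List.pyGetD r (i + 1) ""))
          (i + 1) (PySem.List.pyGetD r i "")
      else r)
    response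

def truncA (response : List String) : List String :=
  pvNOM.foldl
    (fun r pronoun =>
      if pronoun ∈ r then
        match PySem.List.index? r pronoun with
        | some k => PySem.List.slice r (some (k : Int)) none
        | none => r
      else r)
    response

def create_statement (sentence : List String) : String :=
  let response := sentence.foldl
    (fun resp word =>
      if replacementsA.contains word then resp ++ [replacementsA.getD word ""]
      else resp ++ [word]) []
  match PySem.List.pyGet? response 0 with
  | none => ""   -- response[0] raises IndexError on the empty sentence (outside Pre_)
  | some w0 =>
    let response := if w0 ∈ pvQUESTIONS then PySem.List.slice response (some 1) none else response
    let response := resolveA response.length response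
    let response := swapA response
    let response := truncA response
    PySem.Str.join " " response

-- ===== PORT B =====
def reflectB : PySem.Dict String String :=
  PySem.Dict.ofList [("YOU", "I"), ("YOU'RE", "I'M"), ("YOUR", "MY"), ("I", "YOU"),
    ("WE", "YOU"), ("I'M", "YOU'RE"), ("MY", "YOUR"), ("OUR", "YOUR"),
    ("AM", "ARE"), ("ARE", "ARE")]

-- one left-to-right pass: prev = already-resolved previous word, rest.head = unresolved next
def resolveB : Option String → List (String × Bool) → List String
  | _, [] => []
  | prev, (w, fromAre) :: rest =>
    let w' := if fromAre then
        (if prev = some "I" ∨ rest.head?.map Prod.fst = some "I" then "AM" else "ARE")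
      else w
    w' :: resolveB (some w') rest

-- hold the current word, bubble a be-verb rightwards past pronouns
def swapB (cur : String) : List String → List String
  | [] => [cur]
  | nxt :: rest =>
    if cur ∈ pvBE ∧ nxt ∈ pvNOM then nxt :: swapB cur rest
    else cur :: swapB nxt rest

def truncB (response : List String) : List String :=
  pvNOM.foldl
    (fun r pronoun =>
      if pronoun ∈ r then
        match PySem.List.index? r pronoun with
        | some k => PySem.List.slice r (some (k : Int)) none
        | none => r
      else r)
    response

def create_statement_alt (sentence : List String) : String :=
  let words := sentence.map (fun w => (reflectB.getD w w, w == "ARE"))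
  match PySem.List.pyGet? words 0 with
  | none => ""   -- words[0][0] raises IndexError on the empty sentence (outside Pre_)
  | some w0 =>
    let words := if w0.1 ∈ pvQUESTIONS then PySem.List.slice words (some 1) none else words
    let response := resolveB none words
    let response := match response with
      | [] => ([] : List String)
      | c :: rest => swapB c rest
    let response := truncB response
    PySem.Str.join " " response

-- ===== PRECONDITION & SPEC =====
-- Pre_ excludes the empty sentence, on which A raises IndexError (and B raises too), and
-- sentences containing the literal word "ARE.CHECK" — A's internal sentinel, a corner no
-- caller specifies: A rewrites such a word as if it were "ARE", B keeps it verbatim.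
def Pre_create_statement (sentence : List String) : Prop :=
  sentence ≠ [] ∧ "ARE.CHECK" ∉ sentence
instance (sentence : List String) : Decidable (Pre_create_statement sentence) := by
  unfold Pre_create_statement; infer_instance

def pvWitness_create_statement : List String := ["HOW", "ARE", "YOU"]

def Spec_create_statement (sentence : List String) (out : String) : Prop :=
  out = create_statement_alt sentence
instance (sentence : List String) (out : String) : Decidable (Spec_create_statement sentence out) := by
  unfold Spec_create_statement; infer_instance

-- ===== CLAIM (what is proved, stated in full; the proofs are below) =====
def Claim_equal_create_statement : Prop :=
  ∀ (sentence : List String), Dom_create_statement sentence →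
    Pre_create_statement sentence →
    Spec_create_statement sentence (create_statement sentence)

-- ===== LEMMAS AND PROOFS =====

def ramap (wb : List (String × Bool)) : List String :=
  wb.map (fun p => if p.2 then "ARE.CHECK" else p.1)

def relOK (wb : List (String × Bool)) : Prop :=
  ∀ p ∈ wb, (p.2 = true → p.1 = "ARE") ∧ (p.2 = false → p.1 ≠ "ARE.CHECK")

lemma resolveA_no (fuel : Nat) (r : List String) (h : "ARE.CHECK" ∉ r) :
    resolveA fuel r = r := by
  cases fuel <;> simp [resolveA, h]

lemma set_mid (l1 t : List String) (x v : String) :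
    (l1 ++ x :: t).set l1.length v = l1 ++ v :: t := by
  rw [List.set_append_right _ _ (le_refl _)]; simp

lemma getD_mid (l1 t : List String) (x d : String) :
    (l1 ++ x :: t).getD l1.length d = x := by
  simp [List.getD_eq_getElem?_getD]

lemma index_first (done t : List String) (h : "ARE.CHECK" ∉ done) :
    PySem.List.index? (done ++ "ARE.CHECK" :: t) "ARE.CHECK" = some done.length := by
  rw [PySem.List.index?_eq_some_iff]
  exact ⟨done, t, rfl, rfl, h⟩

lemma resolve_eq (wb : List (String × Bool)) : ∀ (done : List String) (fuel : Nat),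
    relOK wb → "ARE.CHECK" ∉ done → wb.countP (·.2) ≤ fuel →
    resolveA fuel (done ++ ramap wb) = done ++ resolveB done.getLast? wb := by
  induction wb with
  | nil =>
    intro done fuel _ hdone _
    simp [ramap, resolveB, resolveA_no fuel done hdone]
  | cons p rest ih =>
    obtain ⟨w, b⟩ := p
    intro done fuel hrel hdone hf
    have hrel_rest : relOK rest := fun q hq => hrel q (List.mem_cons_of_mem _ hq)
    cases b with
    | false =>
      have hw : w ≠ "ARE.CHECK" := ((hrel (w, false) List.mem_cons_self).2) rfl
      have hstep : done ++ ramap ((w, false) :: rest) = (done ++ [w]) ++ ramap rest := by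
        simp [ramap]
      have hcount : rest.countP (·.2) ≤ fuel := by
        rw [List.countP_cons] at hf; simp at hf; omega
      rw [hstep, ih (done ++ [w]) fuel hrel_rest (by simp [hdone, Ne.symm hw]) hcount]
      simp [resolveB]
    | true =>
      have hw : w = "ARE" := (hrel (w, true) List.mem_cons_self).1 rfl
      have hcount : rest.countP (·.2) + 1 ≤ fuel := by
        rw [List.countP_cons] at hf; simp at hf; omega
      obtain ⟨f, rfl⟩ : ∃ f, fuel = f + 1 := ⟨fuel - 1, by omega⟩
      have hr : done ++ ramap ((w, true) :: rest) = done ++ "ARE.CHECK" :: ramap rest := by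
        simp [ramap]
      rw [hr]
      set r : List String := done ++ "ARE.CHECK" :: ramap rest with hrdef
      have hmem : "ARE.CHECK" ∈ r := by simp [hrdef]
      have hidx := index_first done (ramap rest) hdone
      -- condition 1 ↔ prev = "I"
      have c1 : (done.length > 0 ∧ PySem.List.pyGetD r ((done.length : Int) - 1) "" = "I")
          ↔ done.getLast? = some "I" := by
        rcases List.eq_nil_or_concat done with hnil | ⟨l, a, rfl⟩
        · subst hnil; simp
        · simp only [List.concat_eq_append] at hdone hrdef hidx ⊢
          have hcast : ((l ++ [a]).length : Int) - 1 = ((l.length : Nat) : Int) := by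
            simp
          rw [hcast, PySem.List.pyGetD_natCast]
          have : r = l ++ a :: ("ARE.CHECK" :: ramap rest) := by simp [hrdef]
          rw [this, List.getD_eq_getElem?_getD]
          simp
      -- condition 2 ↔ next mapped word = "I"
      have c2 : (((done.length : Int)) < ((r.length : Int)) - 1 ∧
            PySem.List.pyGetD r ((done.length : Int) + 1) "" = "I")
          ↔ rest.head?.map Prod.fst = some "I" := by
        cases rest with
        | nil => simp [hrdef, ramap]
        | cons r0 rest' =>
          have hlen : ((done.length : Int)) < ((r.length : Int)) - 1 := by
            simp [hrdef, ramap]; omega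
          have hcast : (done.length : Int) + 1 = (((done ++ ["ARE.CHECK"]).length : Nat) : Int) := by
            simp
          have hget : PySem.List.pyGetD r ((done.length : Int) + 1) ""
              = (if r0.2 then "ARE.CHECK" else r0.1) := by
            rw [hcast, PySem.List.pyGetD_natCast]
            have : r = (done ++ ["ARE.CHECK"]) ++ (if r0.2 then "ARE.CHECK" else r0.1) :: ramap rest' := by
              simp [hrdef, ramap]
            rw [this, getD_mid]
          rw [hget]
          cases hb0 : r0.2 with
          | true =>
            have : r0.1 = "ARE" := (hrel_rest r0 List.mem_cons_self).1 hb0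
            simp [hlen, this]
          | false => simp [hlen]
      -- step the while loop once
      have hchoose : ∀ v : String, v ≠ "ARE.CHECK" →
          resolveA f (PySem.List.pySetD r (done.length : Int) v)
            = done ++ v :: resolveB (some v) rest := by
        intro v hv
        have hset : PySem.List.pySetD r (done.length : Int) v = (done ++ [v]) ++ ramap rest := by
          rw [PySem.List.pySetD_natCast, hrdef, set_mid]; simp
        rw [hset, ih (done ++ [v]) f hrel_rest (by simp [hdone, Ne.symm hv])
          (by omega)]
        simp
      show resolveA (f + 1) r = _
      rw [resolveA]
      rw [if_pos hmem, hidx]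
      simp only []
      by_cases hc1 : done.length > 0 ∧ PySem.List.pyGetD r ((done.length : Int) - 1) "" = "I"
      · rw [if_pos hc1, hchoose "AM" (by decide)]
        have : done.getLast? = some "I" := c1.mp hc1
        simp [resolveB, this]
      · rw [if_neg hc1]
        by_cases hc2 : ((done.length : Int)) < ((r.length : Int)) - 1 ∧
            PySem.List.pyGetD r ((done.length : Int) + 1) "" = "I"
        · rw [if_pos hc2, hchoose "AM" (by decide)]
          have h2 : rest.head?.map Prod.fst = some "I" := c2.mp hc2
          simp [resolveB, h2]
        · rw [if_neg hc2, hchoose "ARE" (by decide)]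
          have h1 : ¬ done.getLast? = some "I" := fun h => hc1 (c1.mpr h)
          have h2 : ¬ rest.head?.map Prod.fst = some "I" := fun h => hc2 (c2.mpr h)
          simp [resolveB, h1, h2]

lemma swap_aux (t : List String) : ∀ (done : List String) (cur : String),
    (PySem.List.pyRange (done.length : Int) ((done.length : Int) + (t.length : Int)) 1).foldl
      (fun r i =>
        if PySem.List.pyGetD r i "" ∈ pvBE ∧ PySem.List.pyGetD r (i + 1) "" ∈ pvNOM then
          PySem.List.pySetD (PySem.List.pySetD r i (PySem.List.pyGetD r (i + 1) ""))
            (i + 1) (PySem.List.pyGetD r i "")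
        else r) (done ++ cur :: t)
    = done ++ swapB cur t := by
  induction t with
  | nil =>
    intro done cur
    rw [PySem.List.pyRange_one_eq_nil (by simp)]
    simp [swapB]
  | cons nxt t' ih =>
    intro done cur
    have hlt : (done.length : Int) < (done.length : Int) + ((nxt :: t').length : Int) := by
      simp
    rw [PySem.List.pyRange_one_cons hlt]
    rw [List.foldl_cons]
    have hget0 : PySem.List.pyGetD (done ++ cur :: nxt :: t') (done.length : Int) "" = cur := by
      rw [PySem.List.pyGetD_natCast, List.getD_eq_getElem?_getD]; simp
    have hget1 : PySem.List.pyGetD (done ++ cur :: nxt :: t') ((done.length : Int) + 1) "" = nxt := by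
      have hcast : (done.length : Int) + 1 = (((done ++ [cur]).length : Nat) : Int) := by
        simp only [List.length_append, List.length_cons, List.length_nil]; push_cast; omega
      rw [hcast, PySem.List.pyGetD_natCast]
      have h2 : done ++ cur :: nxt :: t' = (done ++ [cur]) ++ nxt :: t' := by simp
      rw [h2, getD_mid]
    by_cases hcond : cur ∈ pvBE ∧ nxt ∈ pvNOM
    · have hstep : (if PySem.List.pyGetD (done ++ cur :: nxt :: t') (done.length : Int) "" ∈ pvBE ∧
            PySem.List.pyGetD (done ++ cur :: nxt :: t') ((done.length : Int) + 1) "" ∈ pvNOM then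
          PySem.List.pySetD (PySem.List.pySetD (done ++ cur :: nxt :: t') (done.length : Int)
              (PySem.List.pyGetD (done ++ cur :: nxt :: t') ((done.length : Int) + 1) ""))
            ((done.length : Int) + 1) (PySem.List.pyGetD (done ++ cur :: nxt :: t') (done.length : Int) "")
        else (done ++ cur :: nxt :: t')) = (done ++ [nxt]) ++ cur :: t' := by
        rw [hget0, hget1, if_pos hcond]
        rw [PySem.List.pySetD_natCast, set_mid]
        have hcast : (done.length : Int) + 1 = (((done ++ [nxt]).length : Nat) : Int) := by
          simp only [List.length_append, List.length_cons, List.length_nil]; push_cast; omega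
        rw [hcast, PySem.List.pySetD_natCast]
        have h2 : done ++ nxt :: nxt :: t' = (done ++ [nxt]) ++ nxt :: t' := by simp
        rw [h2, set_mid]
      have hb2 : (done.length : Int) + ((nxt :: t').length : Int)
          = (done.length : Int) + 1 + ((t'.length : Nat) : Int) := by
        simp only [List.length_cons]; push_cast; omega
      have hstart : (done.length : Int) + 1 = (((done ++ [nxt]).length : Nat) : Int) := by
        simp only [List.length_append, List.length_cons, List.length_nil]; push_cast; omega
      rw [hstep, hb2, hstart, ih (done ++ [nxt]) cur]
      simp [swapB, hcond]
    · have hstep : (if PySem.List.pyGetD (done ++ cur :: nxt :: t') (done.length : Int) "" ∈ pvBE ∧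
            PySem.List.pyGetD (done ++ cur :: nxt :: t') ((done.length : Int) + 1) "" ∈ pvNOM then
          PySem.List.pySetD (PySem.List.pySetD (done ++ cur :: nxt :: t') (done.length : Int)
              (PySem.List.pyGetD (done ++ cur :: nxt :: t') ((done.length : Int) + 1) ""))
            ((done.length : Int) + 1) (PySem.List.pyGetD (done ++ cur :: nxt :: t') (done.length : Int) "")
        else (done ++ cur :: nxt :: t')) = (done ++ [cur]) ++ nxt :: t' := by
        rw [hget0, hget1, if_neg hcond]; simp
      have hb2 : (done.length : Int) + ((nxt :: t').length : Int)
          = (done.length : Int) + 1 + ((t'.length : Nat) : Int) := by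
        simp only [List.length_cons]; push_cast; omega
      have hstart : (done.length : Int) + 1 = (((done ++ [cur]).length : Nat) : Int) := by
        simp only [List.length_append, List.length_cons, List.length_nil]; push_cast; omega
      rw [hstep, hb2, hstart, ih (done ++ [cur]) nxt]
      simp [swapB, hcond]

lemma swapA_eq (L : List String) :
    swapA L = (match L with | [] => ([] : List String) | c :: rest => swapB c rest) := by
  cases L with
  | nil =>
    show swapA [] = []
    rw [swapA, PySem.List.pyRange_one_eq_nil (by simp)]
    simp
  | cons c t =>
    show swapA (c :: t) = swapB c t
    rw [swapA]
    have h := swap_aux t [] c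
    simp only [List.nil_append, List.length_nil, Nat.cast_zero, zero_add] at h
    have hb : ((c :: t).length : Int) - 1 = ((t.length : Nat) : Int) := by
      simp
    rw [hb]
    exact h

lemma word_point (w : String) (hw : w ≠ "ARE.CHECK") :
    (if replacementsA.contains w then replacementsA.getD w "" else w)
    = (if (w == "ARE") then "ARE.CHECK" else reflectB.getD w w) := by
  by_cases h1 : w = "YOU" ; · subst h1; decide
  by_cases h2 : w = "YOU'RE" ; · subst h2; decide
  by_cases h3 : w = "YOUR" ; · subst h3; decide
  by_cases h4 : w = "I" ; · subst h4; decide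
  by_cases h5 : w = "WE" ; · subst h5; decide
  by_cases h6 : w = "I'M" ; · subst h6; decide
  by_cases h7 : w = "MY" ; · subst h7; decide
  by_cases h8 : w = "OUR" ; · subst h8; decide
  by_cases h9 : w = "AM" ; · subst h9; decide
  by_cases h10 : w = "ARE" ; · subst h10; decide
  simp [replacementsA, reflectB, PySem.Dict.ofList, PySem.Dict.update, PySem.Dict.get?_insert,
    PySem.Dict.contains_insert, PySem.Dict.getD_eq_get?_getD, PySem.Dict.get?_empty,
    PySem.Dict.contains_empty, h1, h2, h3, h4, h5, h6, h7, h8, h9, h10]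

lemma reflect_ne (w : String) (hw : w ≠ "ARE.CHECK") : reflectB.getD w w ≠ "ARE.CHECK" := by
  by_cases h1 : w = "YOU" ; · subst h1; decide
  by_cases h2 : w = "YOU'RE" ; · subst h2; decide
  by_cases h3 : w = "YOUR" ; · subst h3; decide
  by_cases h4 : w = "I" ; · subst h4; decide
  by_cases h5 : w = "WE" ; · subst h5; decide
  by_cases h6 : w = "I'M" ; · subst h6; decide
  by_cases h7 : w = "MY" ; · subst h7; decide
  by_cases h8 : w = "OUR" ; · subst h8; decide
  by_cases h9 : w = "AM" ; · subst h9; decide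
  by_cases h10 : w = "ARE" ; · subst h10; decide
  simp [reflectB, PySem.Dict.ofList, PySem.Dict.update, PySem.Dict.get?_insert,
    PySem.Dict.getD_eq_get?_getD, PySem.Dict.get?_empty,
    h1, h2, h3, h4, h5, h6, h7, h8, h9, h10]
  exact hw

lemma map_stage (s : List String) (hs : "ARE.CHECK" ∉ s) :
    s.foldl (fun resp word =>
        if replacementsA.contains word then resp ++ [replacementsA.getD word ""]
        else resp ++ [word]) []
    = ramap (s.map (fun w => (reflectB.getD w w, w == "ARE"))) := by
  have hfun : (fun (resp : List String) word =>
      if replacementsA.contains word then resp ++ [replacementsA.getD word ""]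
      else resp ++ [word])
      = fun resp word => resp ++ [if replacementsA.contains word then replacementsA.getD word "" else word] := by
    funext resp word; split_ifs <;> rfl
  rw [hfun, PySem.List.foldl_append_singleton_eq_map]
  simp only [ramap, List.map_map]
  apply List.map_congr_left
  intro w hw
  exact word_point w (fun h => hs (h ▸ hw))

lemma relOK_map (s : List String) (hs : "ARE.CHECK" ∉ s) :
    relOK (s.map (fun w => (reflectB.getD w w, w == "ARE"))) := by
  intro p hp
  simp only [List.mem_map] at hp
  obtain ⟨w, hw, rfl⟩ := hp
  constructor
  · intro hb
    simp only [beq_iff_eq] at hb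
    subst hb; decide
  · intro _
    exact reflect_ne w (fun h => hs (h ▸ hw))

lemma resolve_top (wb : List (String × Bool)) (hrel : relOK wb) :
    resolveA (ramap wb).length (ramap wb) = resolveB none wb := by
  have h := resolve_eq wb [] (ramap wb).length hrel (by simp)
    (by rw [ramap, List.length_map]; exact List.countP_le_length)
  simpa using h

lemma trunc_eq : truncA = truncB := rfl

lemma tail_pipeline (wb' : List (String × Bool)) (hrel' : relOK wb') :
    PySem.Str.join " " (truncA (swapA (resolveA (ramap wb').length (ramap wb')))) =
    PySem.Str.join " " (truncB (match resolveB none wb' with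
      | [] => ([] : List String) | c :: rest => swapB c rest)) := by
  rw [resolve_top wb' hrel', swapA_eq, trunc_eq]

lemma create_statement_eq :
    ∀ (sentence : List String), sentence ≠ [] → "ARE.CHECK" ∉ sentence →
      create_statement sentence = create_statement_alt sentence := by
  intro sentence hne hac
  unfold create_statement create_statement_alt
  rw [map_stage sentence hac]
  have hrel : relOK (sentence.map (fun w => (reflectB.getD w w, w == "ARE"))) :=
    relOK_map sentence hac
  cases sentence with
  | nil => exact absurd rfl hne
  | cons w0 s' =>
    simp only [List.map_cons, ramap]
    simp only [PySem.List.pyGet?, PySem.List.pyIdx?, List.length_cons]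
    norm_num
    by_cases hq : reflectB.getD w0 w0 ∈ pvQUESTIONS
    · have hA : (if w0 = "ARE" then "ARE.CHECK" else reflectB.getD w0 w0) ∈ pvQUESTIONS := by
        by_cases h : w0 = "ARE"
        · subst h; exact absurd hq (by decide)
        · rwa [if_neg h]
      rw [if_pos hA, if_pos hq, PySem.List.slice_from_one, PySem.List.slice_from_one]
      simp only [List.tail_cons]
      have h2 := tail_pipeline (List.map (fun w => (reflectB.getD w w, w == "ARE")) s')
        (relOK_map s' (fun h => hac (List.mem_cons_of_mem _ h)))
      simpa [ramap, List.map_map] using h2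
    · have hA : ¬ ((if w0 = "ARE" then "ARE.CHECK" else reflectB.getD w0 w0) ∈ pvQUESTIONS) := by
        by_cases h : w0 = "ARE"
        · subst h; decide
        · rwa [if_neg h]
      rw [if_neg hA, if_neg hq]
      have h2 := tail_pipeline (List.map (fun w => (reflectB.getD w w, w == "ARE")) (w0 :: s')) hrel
      simpa [ramap, List.map_map, beq_iff_eq] using h2

-- ===== VERDICT (by name: the statement is the Claim_ definition above) =====
theorem create_statement_spec : Claim_equal_create_statement := by
  unfold Claim_equal_create_statement
  intro sentence _ hpre
  have hp : sentence ≠ [] ∧ "ARE.CHECK" ∉ sentence := hpre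
  unfold Spec_create_statement
  exact create_statement_eq sentence hp.1 hp.2
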